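-- pv_equiv track=rewrite | github.com/LiosK/Rosids-Backup-Tool | rosids.py | str_attrs_to_bits
-- ===== SOURCE A (Python) =====
-- def str_attrs_to_bits(str_attrs):
--     attr_map = { "R": 0x1, "H": 0x2, "S": 0x4, "A": 0x20,
--             "T": 0x100, "C": 0x800, "O": 0x1000, "N": 0x2000, "E": 0x4000 }
--     bits = 0
--     for c in str_attrs.upper():
--         if c not in attr_map:
--             return -1
--         else:
--             bits |= attr_map[c]
--     return bits
-- ===== SOURCE B (Python) =====
-- def str_attrs_to_bits(str_attrs):
--     flags = [("R", 0x1), ("H", 0x2), ("S", 0x4), ("A", 0x20),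
--              ("T", 0x100), ("C", 0x800), ("O", 0x1000), ("N", 0x2000), ("E", 0x4000)]
--     up = str_attrs.upper()
--     if any(c not in "RHSATCONE" for c in up):
--         return -1
--     # iterate over the fixed flag table, not over the string: each flag is a
--     # distinct single bit, so summing the flags whose letter occurs equals the
--     # OR over all characters (duplicates contribute once by construction)
--     return sum(bit for ch, bit in flags if ch in up)
-- ===== Notes on version B (the rewrite author's own statement) =====
-- stated objective: alternative
-- what changed: B inverts the traversal: after validating that every uppercased character is an attribute letter, it iterates over the fixed 9-entry flag table and sums the bit of each flag whose letter occurs in the string, instead of A's per-character loop that ORs a dictionary lookup with early return.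
import Mathlib
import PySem

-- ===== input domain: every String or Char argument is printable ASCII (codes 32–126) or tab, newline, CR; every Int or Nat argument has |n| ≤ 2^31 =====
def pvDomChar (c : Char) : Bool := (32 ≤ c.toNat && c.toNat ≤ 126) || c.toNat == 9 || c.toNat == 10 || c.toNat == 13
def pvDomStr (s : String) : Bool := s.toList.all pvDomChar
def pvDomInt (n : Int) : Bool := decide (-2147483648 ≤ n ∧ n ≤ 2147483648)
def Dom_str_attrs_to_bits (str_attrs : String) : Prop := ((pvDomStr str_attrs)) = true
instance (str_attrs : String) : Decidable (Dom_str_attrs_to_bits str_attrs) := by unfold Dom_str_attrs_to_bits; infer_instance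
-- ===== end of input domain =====

-- B validates first, then iterates over the fixed flag table summing the bit of each
-- flag whose letter occurs in the string, instead of A's per-character OR loop; same cost.

-- ===== PORT A =====
-- the dict literal of A (Char keys: Python iterates a str as 1-char strings)
def pvAttrMap : PySem.Dict Char Int :=
  PySem.Dict.ofList [('R', 0x1), ('H', 0x2), ('S', 0x4), ('A', 0x20),
    ('T', 0x100), ('C', 0x800), ('O', 0x1000), ('N', 0x2000), ('E', 0x4000)]

-- A's loop: early return -1 on an unknown character, otherwise OR into bits
def pvGoA : List Char → Int → Int
  | [], bits => bits
  | c :: cs, bits =>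
    match PySem.Dict.get? pvAttrMap c with
    | none => -1
    | some v => pvGoA cs (PySem.Int.bor bits v)

def str_attrs_to_bits (str_attrs : String) : Int :=
  pvGoA (PySem.Str.upper str_attrs).toList 0

-- ===== PORT B =====
-- B's flag table and the letters of "RHSATCONE" (membership of a 1-char string in it)
def pvFlags : List (Char × Int) :=
  [('R', 0x1), ('H', 0x2), ('S', 0x4), ('A', 0x20),
   ('T', 0x100), ('C', 0x800), ('O', 0x1000), ('N', 0x2000), ('E', 0x4000)]

def pvValid : List Char := ['R', 'H', 'S', 'A', 'T', 'C', 'O', 'N', 'E']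

def str_attrs_to_bits_alt (str_attrs : String) : Int :=
  let up := (PySem.Str.upper str_attrs).toList
  if up.any (fun c => !(pvValid.contains c)) then -1
  else (pvFlags.filter (fun p => up.contains p.1)).foldl (fun acc p => acc + p.2) 0

-- ===== PRECONDITION & SPEC =====
def Spec_str_attrs_to_bits (str_attrs : String) (out : Int) : Prop := out = str_attrs_to_bits_alt str_attrs
instance (str_attrs : String) (out : Int) : Decidable (Spec_str_attrs_to_bits str_attrs out) := by unfold Spec_str_attrs_to_bits; infer_instance

-- ===== CLAIM (what is proved, stated in full; the proofs are below) =====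
def Claim_equal_str_attrs_to_bits : Prop := ∀ (str_attrs : String), Dom_str_attrs_to_bits str_attrs → Spec_str_attrs_to_bits str_attrs (str_attrs_to_bits str_attrs)

-- ===== LEMMAS AND PROOFS =====

-- the sum of the flags of a given set of present letters, as a function of 9 Booleans
def pvMask (r h s a t c o n e : Bool) : Int :=
  (if r then 0x1 else 0) + (if h then 0x2 else 0) + (if s then 0x4 else 0) +
  (if a then 0x20 else 0) + (if t then 0x100 else 0) + (if c then 0x800 else 0) +
  (if o then 0x1000 else 0) + (if n then 0x2000 else 0) + (if e then 0x4000 else 0)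

-- B's filter-and-sum over the table is pvMask of the 9 membership Booleans
theorem pvSum_eq_mask (P : Char → Bool) :
    (pvFlags.filter (fun p => P p.1)).foldl (fun acc p => acc + p.2) 0 =
      pvMask (P 'R') (P 'H') (P 'S') (P 'A') (P 'T') (P 'C') (P 'O') (P 'N') (P 'E') := by
  simp only [pvFlags, List.filter]
  cases P 'R' <;> cases P 'H' <;> cases P 'S' <;> cases P 'A' <;> cases P 'T' <;>
    cases P 'C' <;> cases P 'O' <;> cases P 'N' <;> cases P 'E' <;>
    simp [pvMask, List.foldl]

-- ORing one flag into a mask sets its Boolean (nine per-letter facts, all decidable)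
theorem pvBorR : ∀ r h s a t c o n e : Bool, PySem.Int.bor (pvMask r h s a t c o n e) 0x1 = pvMask true h s a t c o n e := by decide
theorem pvBorH : ∀ r h s a t c o n e : Bool, PySem.Int.bor (pvMask r h s a t c o n e) 0x2 = pvMask r true s a t c o n e := by decide
theorem pvBorS : ∀ r h s a t c o n e : Bool, PySem.Int.bor (pvMask r h s a t c o n e) 0x4 = pvMask r h true a t c o n e := by decide
theorem pvBorA : ∀ r h s a t c o n e : Bool, PySem.Int.bor (pvMask r h s a t c o n e) 0x20 = pvMask r h s true t c o n e := by decide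
theorem pvBorT : ∀ r h s a t c o n e : Bool, PySem.Int.bor (pvMask r h s a t c o n e) 0x100 = pvMask r h s a true c o n e := by decide
theorem pvBorC : ∀ r h s a t c o n e : Bool, PySem.Int.bor (pvMask r h s a t c o n e) 0x800 = pvMask r h s a t true o n e := by decide
theorem pvBorO : ∀ r h s a t c o n e : Bool, PySem.Int.bor (pvMask r h s a t c o n e) 0x1000 = pvMask r h s a t c true n e := by decide
theorem pvBorN : ∀ r h s a t c o n e : Bool, PySem.Int.bor (pvMask r h s a t c o n e) 0x2000 = pvMask r h s a t c o true e := by decide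
theorem pvBorE : ∀ r h s a t c o n e : Bool, PySem.Int.bor (pvMask r h s a t c o n e) 0x4000 = pvMask r h s a t c o n true := by decide

-- membership in A's dict agrees with membership in B's letter list
theorem pvAttrMap_eq : pvAttrMap = PySem.Dict.mk
    [('R', 0x1), ('H', 0x2), ('S', 0x4), ('A', 0x20),
     ('T', 0x100), ('C', 0x800), ('O', 0x1000), ('N', 0x2000), ('E', 0x4000)] := by decide

theorem pvContains_agree (ch : Char) : pvAttrMap.contains ch = pvValid.contains ch := by
  rw [pvAttrMap_eq]
  simp [pvValid, BEq.comm, Bool.beq_eq_decide_eq]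

-- A's loop on an all-valid list, from any mask accumulator
theorem pvGoA_mask (cs : List Char) (hv : ∀ x ∈ cs, pvValid.contains x = true) :
    ∀ r h s a t c o n e : Bool,
      pvGoA cs (pvMask r h s a t c o n e) =
        pvMask (r || cs.contains 'R') (h || cs.contains 'H') (s || cs.contains 'S')
               (a || cs.contains 'A') (t || cs.contains 'T') (c || cs.contains 'C')
               (o || cs.contains 'O') (n || cs.contains 'N') (e || cs.contains 'E') := by
  induction cs with
  | nil => intro r h s a t c o n e; simp [pvGoA]
  | cons x cs ih =>
    intro r h s a t c o n e
    have hx : pvValid.contains x = true := hv x (List.mem_cons_self ..)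
    have hv' : ∀ y ∈ cs, pvValid.contains y = true := fun y hy => hv y (List.mem_cons_of_mem _ hy)
    have hx' : x ∈ pvValid := by simpa using hx
    simp only [pvValid, List.mem_cons, List.not_mem_nil, or_false] at hx'
    rcases hx' with rfl | rfl | rfl | rfl | rfl | rfl | rfl | rfl | rfl
    · rw [show pvGoA ('R' :: cs) (pvMask r h s a t c o n e)
            = pvGoA cs (PySem.Int.bor (pvMask r h s a t c o n e) 0x1) from by
          simp [pvGoA, show PySem.Dict.get? pvAttrMap 'R' = some 0x1 from by decide],
        pvBorR, ih hv']
      simp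
    · rw [show pvGoA ('H' :: cs) (pvMask r h s a t c o n e)
            = pvGoA cs (PySem.Int.bor (pvMask r h s a t c o n e) 0x2) from by
          simp [pvGoA, show PySem.Dict.get? pvAttrMap 'H' = some 0x2 from by decide],
        pvBorH, ih hv']
      simp
    · rw [show pvGoA ('S' :: cs) (pvMask r h s a t c o n e)
            = pvGoA cs (PySem.Int.bor (pvMask r h s a t c o n e) 0x4) from by
          simp [pvGoA, show PySem.Dict.get? pvAttrMap 'S' = some 0x4 from by decide],
        pvBorS, ih hv']
      simp
    · rw [show pvGoA ('A' :: cs) (pvMask r h s a t c o n e)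
            = pvGoA cs (PySem.Int.bor (pvMask r h s a t c o n e) 0x20) from by
          simp [pvGoA, show PySem.Dict.get? pvAttrMap 'A' = some 0x20 from by decide],
        pvBorA, ih hv']
      simp
    · rw [show pvGoA ('T' :: cs) (pvMask r h s a t c o n e)
            = pvGoA cs (PySem.Int.bor (pvMask r h s a t c o n e) 0x100) from by
          simp [pvGoA, show PySem.Dict.get? pvAttrMap 'T' = some 0x100 from by decide],
        pvBorT, ih hv']
      simp
    · rw [show pvGoA ('C' :: cs) (pvMask r h s a t c o n e)
            = pvGoA cs (PySem.Int.bor (pvMask r h s a t c o n e) 0x800) from by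
          simp [pvGoA, show PySem.Dict.get? pvAttrMap 'C' = some 0x800 from by decide],
        pvBorC, ih hv']
      simp
    · rw [show pvGoA ('O' :: cs) (pvMask r h s a t c o n e)
            = pvGoA cs (PySem.Int.bor (pvMask r h s a t c o n e) 0x1000) from by
          simp [pvGoA, show PySem.Dict.get? pvAttrMap 'O' = some 0x1000 from by decide],
        pvBorO, ih hv']
      simp
    · rw [show pvGoA ('N' :: cs) (pvMask r h s a t c o n e)
            = pvGoA cs (PySem.Int.bor (pvMask r h s a t c o n e) 0x2000) from by
          simp [pvGoA, show PySem.Dict.get? pvAttrMap 'N' = some 0x2000 from by decide],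
        pvBorN, ih hv']
      simp
    · rw [show pvGoA ('E' :: cs) (pvMask r h s a t c o n e)
            = pvGoA cs (PySem.Int.bor (pvMask r h s a t c o n e) 0x4000) from by
          simp [pvGoA, show PySem.Dict.get? pvAttrMap 'E' = some 0x4000 from by decide],
        pvBorE, ih hv']
      simp

-- A's loop returns -1 as soon as the list has an invalid character
theorem pvGoA_neg (cs : List Char) (hv : ∃ x ∈ cs, pvValid.contains x = false) :
    ∀ bits, pvGoA cs bits = -1 := by
  induction cs with
  | nil => simp at hv
  | cons c cs ih =>
    intro bits
    cases h : PySem.Dict.get? pvAttrMap c with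
    | none => simp [pvGoA, h]
    | some v =>
      have hc : pvValid.contains c = true := by
        rw [← pvContains_agree, PySem.Dict.contains_eq_isSome_get?, h]; rfl
      obtain ⟨x, hx, hxv⟩ := hv
      rcases List.mem_cons.mp hx with rfl | hx'
      · rw [hc] at hxv; cases hxv
      · simp only [pvGoA, h]
        exact ih ⟨x, hx', hxv⟩ _

-- ===== VERDICT (by name: the statement is the Claim_ definition above) =====
theorem str_attrs_to_bits_spec : Claim_equal_str_attrs_to_bits := by
  intro s _
  unfold Spec_str_attrs_to_bits str_attrs_to_bits str_attrs_to_bits_alt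
  set up := (PySem.Str.upper s).toList with hup
  by_cases hbad : up.any (fun c => !(pvValid.contains c)) = true
  · rw [if_pos hbad]
    obtain ⟨x, hx, hxv⟩ := List.any_eq_true.mp hbad
    exact pvGoA_neg up ⟨x, hx, by simpa using hxv⟩ 0
  · rw [if_neg hbad]
    have hv : ∀ x ∈ up, pvValid.contains x = true := by
      intro x hx
      by_contra hno
      exact hbad (List.any_eq_true.mpr ⟨x, hx, by simpa using hno⟩)
    rw [pvSum_eq_mask up.contains,
      show (0 : Int) = pvMask false false false false false false false false false from by decide,
      pvGoA_mask up hv]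
    simp
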